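-- pv_equiv track=rewrite | github.com/marirenab/clinical-trial-retention-toolkit | src/trial_retention_toolkit/clinical_trials.py | summarize_baseline_measures
-- ===== SOURCE A (Python) =====
-- from typing import Any
--
-- def summarize_baseline_measures(results_entry: dict[str, Any]) -> dict[str, float | None]:
--     """Summarize baseline measure richness and a few frequent numeric measures."""
--     measures = results_entry.get("baselineCharacteristicsModule", {}).get("measures", [])
--     summary: dict[str, float | None] = {
--         "baseline_measure_count": len(measures),
--         "baseline_has_bmi": 0,
--         "baseline_has_weight": 0,
--         "baseline_has_height": 0,
--         "baseline_has_depression_scale": 0,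
--     }
--
--     for measure in measures:
--         title = (measure.get("title") or "").lower()
--         if "body mass index" in title or "bmi" in title:
--             summary["baseline_has_bmi"] = 1
--         if "weight" in title:
--             summary["baseline_has_weight"] = 1
--         if "height" in title:
--             summary["baseline_has_height"] = 1
--         if "depression" in title or "madrs" in title or "phq" in title or "ham-d" in title:
--             summary["baseline_has_depression_scale"] = 1
--     return summary
-- ===== SOURCE B (Python) =====
-- def summarize_baseline_measures(results_entry):
--     """Summarize baseline measure richness and a few frequent numeric measures."""
--     measures = results_entry.get("baselineCharacteristicsModule", {}).get("measures", [])
--     # Concatenate all lowered titles into one newline-separated text: the keywords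
--     # contain no newline, so a keyword occurs in the text iff it occurs in some title.
--     blob = "\n".join((m.get("title") or "").lower() for m in measures)
--     return {
--         "baseline_measure_count": len(measures),
--         "baseline_has_bmi": int("body mass index" in blob or "bmi" in blob),
--         "baseline_has_weight": int("weight" in blob),
--         "baseline_has_height": int("height" in blob),
--         "baseline_has_depression_scale": int(
--             "depression" in blob or "madrs" in blob or "phq" in blob or "ham-d" in blob
--         ),
--     }
-- ===== Notes on version B (the rewrite author's own statement) =====
-- stated objective: alternative
-- what changed: Instead of one pass that mutates flag slots per measure, B joins all lowered titles into a single newline-separated text and computes each flag as one substring test per keyword on that text (correct because no keyword contains a newline).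
import Mathlib
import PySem

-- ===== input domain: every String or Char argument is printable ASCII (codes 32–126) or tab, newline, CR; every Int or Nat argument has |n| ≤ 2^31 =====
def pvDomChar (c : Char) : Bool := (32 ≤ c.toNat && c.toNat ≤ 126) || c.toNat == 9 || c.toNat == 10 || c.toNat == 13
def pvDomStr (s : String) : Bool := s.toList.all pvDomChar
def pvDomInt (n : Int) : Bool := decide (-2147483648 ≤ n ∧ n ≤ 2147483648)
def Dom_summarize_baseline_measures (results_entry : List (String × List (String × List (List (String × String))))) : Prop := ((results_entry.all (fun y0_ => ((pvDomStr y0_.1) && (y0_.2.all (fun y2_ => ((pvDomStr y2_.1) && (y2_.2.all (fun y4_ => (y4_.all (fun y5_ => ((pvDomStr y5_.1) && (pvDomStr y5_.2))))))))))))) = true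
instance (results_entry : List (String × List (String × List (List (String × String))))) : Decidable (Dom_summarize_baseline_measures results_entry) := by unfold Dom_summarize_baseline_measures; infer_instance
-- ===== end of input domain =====

-- B replaces A's flag-mutating pass over the measures by one newline-joined text of all
-- lowered titles, with one substring test per keyword on that text (alternative; no speed claim).

-- (m.get("title") or "").lower() — shared by both Pythons verbatim
def pvLowerTitle (m : List (String × String)) : String :=
  PySem.Str.lower ((m.lookup "title").getD "")

-- the four keyword tests (the same boolean expressions both Pythons write; A applies them
-- to each lowered title, B to the joined text)
def pvHasBmi (t : String) : Bool := PySem.Str.isIn "body mass index" t || PySem.Str.isIn "bmi" t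
def pvHasWeight (t : String) : Bool := PySem.Str.isIn "weight" t
def pvHasHeight (t : String) : Bool := PySem.Str.isIn "height" t
def pvHasDep (t : String) : Bool :=
  PySem.Str.isIn "depression" t || PySem.Str.isIn "madrs" t || PySem.Str.isIn "phq" t || PySem.Str.isIn "ham-d" t

-- ===== PORT A =====
def summarize_baseline_measures (results_entry : List (String × List (String × List (List (String × String))))) : List (String × Int) :=
  let measures := (((results_entry.lookup "baselineCharacteristicsModule").getD []).lookup "measures").getD []
  -- the summary dict's four mutable flag slots, carried as a quadruple through the single loop
  let flags := measures.foldl (fun (s : Int × Int × Int × Int) m =>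
    let title := pvLowerTitle m
    let s := if pvHasBmi title then (1, s.2.1, s.2.2.1, s.2.2.2) else s
    let s := if pvHasWeight title then (s.1, 1, s.2.2.1, s.2.2.2) else s
    let s := if pvHasHeight title then (s.1, s.2.1, 1, s.2.2.2) else s
    let s := if pvHasDep title then (s.1, s.2.1, s.2.2.1, 1) else s
    s) (0, 0, 0, 0)
  [("baseline_measure_count", (measures.length : Int)),
   ("baseline_has_bmi", flags.1),
   ("baseline_has_weight", flags.2.1),
   ("baseline_has_height", flags.2.2.1),
   ("baseline_has_depression_scale", flags.2.2.2)]

-- ===== PORT B =====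
-- int(bool)
def pvB2I (b : Bool) : Int := if b then 1 else 0

def summarize_baseline_measures_alt (results_entry : List (String × List (String × List (List (String × String))))) : List (String × Int) :=
  let measures := (((results_entry.lookup "baselineCharacteristicsModule").getD []).lookup "measures").getD []
  let blob := PySem.Str.join "\n" (measures.map pvLowerTitle)
  [("baseline_measure_count", (measures.length : Int)),
   ("baseline_has_bmi", pvB2I (pvHasBmi blob)),
   ("baseline_has_weight", pvB2I (pvHasWeight blob)),
   ("baseline_has_height", pvB2I (pvHasHeight blob)),
   ("baseline_has_depression_scale", pvB2I (pvHasDep blob))]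

-- ===== PRECONDITION & SPEC =====
def Spec_summarize_baseline_measures (results_entry : List (String × List (String × List (List (String × String))))) (out : List (String × Int)) : Prop := out = summarize_baseline_measures_alt results_entry
instance (results_entry : List (String × List (String × List (List (String × String))))) (out : List (String × Int)) : Decidable (Spec_summarize_baseline_measures results_entry out) := by unfold Spec_summarize_baseline_measures; infer_instance

-- ===== CLAIM (what is proved, stated in full; the proofs are below) =====
def Claim_equal_summarize_baseline_measures : Prop := ∀ (results_entry : List (String × List (String × List (List (String × String))))), Dom_summarize_baseline_measures results_entry → Spec_summarize_baseline_measures results_entry (summarize_baseline_measures results_entry)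

-- ===== LEMMAS AND PROOFS =====

-- A's single loop over the measures computes, in each flag slot, 1 iff some title matches that slot's keywords
theorem flags_foldl (l : List (List (String × String))) (s : Int × Int × Int × Int) :
    l.foldl (fun (s : Int × Int × Int × Int) m =>
      let title := pvLowerTitle m
      let s := if pvHasBmi title then (1, s.2.1, s.2.2.1, s.2.2.2) else s
      let s := if pvHasWeight title then (s.1, 1, s.2.2.1, s.2.2.2) else s
      let s := if pvHasHeight title then (s.1, s.2.1, 1, s.2.2.2) else s
      let s := if pvHasDep title then (s.1, s.2.1, s.2.2.1, 1) else s
      s) s =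
    (if l.any (fun m => pvHasBmi (pvLowerTitle m)) then 1 else s.1,
     if l.any (fun m => pvHasWeight (pvLowerTitle m)) then 1 else s.2.1,
     if l.any (fun m => pvHasHeight (pvLowerTitle m)) then 1 else s.2.2.1,
     if l.any (fun m => pvHasDep (pvLowerTitle m)) then 1 else s.2.2.2) := by
  induction l generalizing s with
  | nil => simp
  | cons m rest ih =>
    simp only [List.foldl_cons, List.any_cons, ih]
    by_cases h1 : pvHasBmi (pvLowerTitle m) <;>
    by_cases h2 : pvHasWeight (pvLowerTitle m) <;>
    by_cases h3 : pvHasHeight (pvLowerTitle m) <;>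
    by_cases h4 : pvHasDep (pvLowerTitle m) <;>
      simp [h1, h2, h3, h4]

-- a prefix of u ++ c :: v that avoids c is a prefix of u
theorem prefix_sep {c : Char} {sub u v : List Char}
    (h : sub <+: u ++ c :: v) (hc : c ∉ sub) : sub <+: u := by
  rcases List.prefix_or_prefix_of_prefix h (List.prefix_append u (c :: v)) with h' | h'
  · exact h'
  · obtain ⟨r, hr⟩ := h'
    cases r with
    | nil => simp at hr; simp [← hr]
    | cons a r' =>
      exfalso
      obtain ⟨t, ht⟩ := h
      rw [← hr, List.append_assoc] at ht
      have h2 := List.append_cancel_left ht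
      simp only [List.cons_append] at h2
      have hac : a = c := (List.cons.injEq _ _ _ _ ▸ h2).1
      apply hc
      rw [← hr, hac]
      exact List.mem_append_right _ (List.mem_cons_self)

-- an infix of u ++ c :: v that avoids c lies entirely in u or entirely in v
theorem infix_sep {c : Char} {sub : List Char} (hc : c ∉ sub) :
    ∀ u v : List Char, (sub <:+: u ++ c :: v ↔ sub <:+: u ∨ sub <:+: v) := by
  intro u
  induction u with
  | nil =>
    intro v
    constructor
    · intro h
      rcases List.infix_cons_iff.mp (by simpa using h) with h' | h'
      · have : sub <+: ([] : List Char) := prefix_sep (by simpa using h') hc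
        exact Or.inl this.isInfix
      · exact Or.inr h'
    · rintro (h | h)
      · simp at h; simp [h]
      · simpa using List.infix_cons h
  | cons x u' ih =>
    intro v
    constructor
    · intro h
      rcases List.infix_cons_iff.mp (by simpa using h) with h' | h'
      · have : sub <+: x :: u' := prefix_sep (u := x :: u') (v := v) (by simpa using h') hc
        exact Or.inl this.isInfix
      · rcases (ih v).mp h' with h'' | h''
        · exact Or.inl (List.infix_cons h'')
        · exact Or.inr h''
    · rintro (h | h)
      · rcases List.infix_cons_iff.mp h with h' | h'
        · exact List.IsPrefix.isInfix (h'.trans (by simp))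
        · have : sub <:+: u' ++ c :: v := (ih v).mpr (Or.inl h')
          simpa using List.infix_cons this
      · have : sub <:+: u' ++ c :: v := (ih v).mpr (Or.inr h)
        simpa using List.infix_cons this

-- a newline-free, non-empty pattern occurs in the newline-joined list iff it occurs in some part
theorem isIn_join (kw : List Char) (hne : kw ≠ []) (hc : '\n' ∉ kw) :
    ∀ ts : List (List Char),
      PySem.Chars.isIn kw (PySem.Chars.join ['\n'] ts) = ts.any (fun t => PySem.Chars.isIn kw t) := by
  intro ts
  induction ts with
  | nil =>
    rw [PySem.Chars.join_nil]
    simp only [List.any_nil]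
    rw [PySem.Chars.isIn_eq_false_iff]
    intro h
    exact hne (List.eq_nil_of_infix_nil h)
  | cons t rest ih =>
    cases rest with
    | nil => simp [PySem.Chars.join_singleton]
    | cons t2 rest' =>
      rw [PySem.Chars.join_cons_cons, List.any_cons, ← ih]
      rw [Bool.eq_iff_iff]
      simp only [PySem.Chars.isIn_iff_infix, Bool.or_eq_true]
      rw [List.append_assoc, List.singleton_append]
      exact infix_sep hc t _

-- the same fact at String level, newline-joined
theorem str_isIn_join (kw : String) (hne : kw.toList ≠ []) (hc : '\n' ∉ kw.toList)
    (ts : List String) :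
    PySem.Str.isIn kw (PySem.Str.join "\n" ts) = ts.any (fun t => PySem.Str.isIn kw t) := by
  have h := isIn_join kw.toList hne hc (ts.map String.toList)
  simp only [PySem.Str.isIn_eq, PySem.Str.toList_join]
  have hsep : ("\n" : String).toList = ['\n'] := by decide
  rw [hsep, h, List.any_map]
  rfl

-- each keyword group's test on the joined text equals the any-scan over the parts
theorem hasBmi_join (ts : List String) :
    pvHasBmi (PySem.Str.join "\n" ts) = ts.any pvHasBmi := by
  unfold pvHasBmi
  rw [str_isIn_join _ (by decide) (by decide), str_isIn_join _ (by decide) (by decide)]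
  rw [Bool.eq_iff_iff]; simp only [Bool.or_eq_true, List.any_eq_true, and_or_left, exists_or]

theorem hasWeight_join (ts : List String) :
    pvHasWeight (PySem.Str.join "\n" ts) = ts.any pvHasWeight := by
  unfold pvHasWeight
  rw [str_isIn_join _ (by decide) (by decide)]

theorem hasHeight_join (ts : List String) :
    pvHasHeight (PySem.Str.join "\n" ts) = ts.any pvHasHeight := by
  unfold pvHasHeight
  rw [str_isIn_join _ (by decide) (by decide)]

theorem hasDep_join (ts : List String) :
    pvHasDep (PySem.Str.join "\n" ts) = ts.any pvHasDep := by
  unfold pvHasDep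
  rw [str_isIn_join _ (by decide) (by decide), str_isIn_join _ (by decide) (by decide),
      str_isIn_join _ (by decide) (by decide), str_isIn_join _ (by decide) (by decide)]
  rw [Bool.eq_iff_iff]; simp only [Bool.or_eq_true, List.any_eq_true, and_or_left, exists_or]

-- ===== VERDICT (by name: the statement is the Claim_ definition above) =====
theorem summarize_baseline_measures_spec : Claim_equal_summarize_baseline_measures := by
  intro results_entry _
  unfold Spec_summarize_baseline_measures
  unfold summarize_baseline_measures summarize_baseline_measures_alt
  simp only [flags_foldl, hasBmi_join, hasWeight_join, hasHeight_join, hasDep_join,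
    List.any_map, pvB2I, Function.comp_def]
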